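-- pv_equiv track=rewrite | github.com/abashimov/data-structures-and-algorithms-tira | dividend.py | find_profits
-- ===== SOURCE A (Python) =====
-- def find_profits(prices):
--     result = []
--     min_price = prices[0]
--     for i in range(len(prices)):
--         if prices[i] + i < min_price:
--             min_price = prices[i] + i
--         price = (prices[i] + i) - min_price
--         result.append(price)
--     return result
-- ===== SOURCE B (Python) =====
-- def find_profits(prices):
--     t = [p + i for i, p in enumerate(prices)]
--     return [x - min(t[:i + 1]) for i, x in enumerate(t)]
-- ===== Notes on version B (the rewrite author's own statement) =====
-- stated objective: simpler
-- what changed: Replaces A's single-pass loop that maintains a running minimum accumulator by the direct definition: build the index-adjusted list t once, then for each position subtract min(t[:i+1]) computed afresh by an inner scan (no running state).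
import Mathlib
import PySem

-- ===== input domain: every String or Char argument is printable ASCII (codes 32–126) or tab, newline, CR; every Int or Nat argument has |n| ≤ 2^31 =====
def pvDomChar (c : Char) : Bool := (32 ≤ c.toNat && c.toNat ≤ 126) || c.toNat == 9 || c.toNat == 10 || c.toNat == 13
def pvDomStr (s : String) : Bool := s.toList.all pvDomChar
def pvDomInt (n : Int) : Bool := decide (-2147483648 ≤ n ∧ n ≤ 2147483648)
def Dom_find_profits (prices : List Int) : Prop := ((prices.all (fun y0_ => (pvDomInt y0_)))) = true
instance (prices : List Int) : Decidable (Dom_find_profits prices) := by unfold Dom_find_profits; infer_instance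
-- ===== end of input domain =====

-- B replaces A's single-pass running-minimum accumulator by the direct definition: a per-index inner scan min(t[:i+1]); shorter and stateless, at quadratic cost.

-- ===== PORT A =====
def find_profits (prices : List Int) : List Int :=
  match PySem.List.pyGet? prices 0 with
  | none => []   -- reading the first element raises IndexError on the empty list; excluded by Pre_
  | some m0 =>
    ((PySem.List.pyRange 0 (prices.length : Int)).foldl
      (fun (st : List Int × Int) i =>
        let v := PySem.List.pyGetD prices i 0 + i
        let mp := if v < st.2 then v else st.2
        (st.1 ++ [v - mp], mp))
      ([], m0)).1

-- ===== PORT B =====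
def find_profits_alt (prices : List Int) : List Int :=
  let t := (PySem.List.enumerate prices).map (fun ip => ip.2 + ip.1)
  (PySem.List.enumerate t).map (fun ix =>
    -- min(t[:i+1]); the slice is nonempty here, so min? is always some and the default is never used
    ix.2 - (PySem.List.min? (PySem.List.slice t none (some (ix.1 + 1))) (fun y => y)).getD 0)

-- ===== PRECONDITION & SPEC =====
-- Pre_ excludes only the empty list, on which A raises IndexError reading the first element.
def Pre_find_profits (prices : List Int) : Prop := prices ≠ []
instance (prices : List Int) : Decidable (Pre_find_profits prices) := by unfold Pre_find_profits; infer_instance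
def pvWitness_find_profits : List Int := ([1, 2, 0])

def Spec_find_profits (prices : List Int) (out : List Int) : Prop := out = find_profits_alt prices
instance (prices : List Int) (out : List Int) : Decidable (Spec_find_profits prices out) := by unfold Spec_find_profits; infer_instance

-- ===== CLAIM (what is proved, stated in full; the proofs are below) =====
def Claim_equal_find_profits : Prop := ∀ (prices : List Int), Dom_find_profits prices → Pre_find_profits prices → Spec_find_profits prices (find_profits prices)

-- ===== LEMMAS AND PROOFS =====

-- the common value of both programs on the tail: v - (minimum so far), seeded with m
def coreV (m : Int) : List Int → List Int
  | [] => []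
  | v :: r => (v - min m v) :: coreV (min m v) r

lemma foldl_pyRange_enumerate {α β : Type} (d : α) (g : β → Int → α → β) :
    ∀ (xs pre : List α) (init : β),
    (PySem.List.pyRange (pre.length : Int) ((pre.length : Int) + (xs.length : Int))).foldl
        (fun st i => g st i (PySem.List.pyGetD (pre ++ xs) i d)) init
      = (PySem.List.enumerate xs (pre.length : Int)).foldl (fun st p => g st p.1 p.2) init := by
  intro xs
  induction xs with
  | nil =>
    intro pre init
    simp [PySem.List.pyRange_one_eq_nil, PySem.List.enumerate_nil]
  | cons x xs ih =>
    intro pre init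
    rw [PySem.List.pyRange_one_cons (by simp only [List.length_cons]; omega), PySem.List.enumerate_cons]
    simp only [List.foldl_cons]
    have hx : PySem.List.pyGetD (pre ++ x :: xs) (pre.length : Int) d = x := by
      rw [PySem.List.pyGetD_eq_getElem _ d (by positivity)
            (by simp only [List.length_append, List.length_cons]; omega)]
      simp
    rw [hx]
    have h := ih (pre ++ [x]) (g init (pre.length : Int) x)
    have hl : pre ++ x :: xs = (pre ++ [x]) ++ xs := by simp
    have hb : ((pre.length : Int)) + ((x :: xs).length : Int) = (((pre ++ [x]).length : Int)) + (xs.length : Int) := by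
      simp; ring
    have ha : (pre.length : Int) + 1 = ((pre ++ [x]).length : Int) := by simp
    rw [hl, hb, ha, h]

lemma foldA_core :
    ∀ (ps : List (Int × Int)) (res : List Int) (m : Int),
    (ps.foldl
        (fun (st : List Int × Int) p =>
          let v := p.2 + p.1
          let mp := if v < st.2 then v else st.2
          (st.1 ++ [v - mp], mp))
        (res, m)).1
      = res ++ coreV m (ps.map (fun ip => ip.2 + ip.1)) := by
  intro ps
  induction ps with
  | nil => intro res m; simp [coreV]
  | cons p r ih =>
    intro res m
    simp only [List.foldl_cons, List.map_cons, coreV]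
    have hm : (if p.2 + p.1 < m then p.2 + p.1 else m) = min m (p.2 + p.1) := by
      split <;> omega
    rw [hm, ih]
    simp

lemma min?_push (xs : List Int) (m v : Int)
    (h : PySem.List.min? xs (fun y => y) = some m) :
    PySem.List.min? (xs ++ [v]) (fun y => y) = some (min m v) := by
  cases xs with
  | nil => simp [PySem.List.min?] at h
  | cons x t =>
    rw [PySem.List.min?_id_cons] at h
    rw [List.cons_append, PySem.List.min?_id_cons, List.foldl_append]
    simp_all

lemma B_core :
    ∀ (vs pre : List Int) (m : Int),
    PySem.List.min? pre (fun y => y) = some m →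
    (PySem.List.enumerate vs ((pre.length : Int))).map
      (fun ix => ix.2 -
        (PySem.List.min? (PySem.List.slice (pre ++ vs) none (some (ix.1 + 1))) (fun y => y)).getD 0)
      = coreV m vs := by
  intro vs
  induction vs with
  | nil => intro pre m _; simp [PySem.List.enumerate_nil, coreV]
  | cons v r ih =>
    intro pre m hmin
    rw [PySem.List.enumerate_cons, List.map_cons]
    have hcast : ((pre.length : Int)) + 1 = (((pre.length + 1 : Nat)) : Int) := by push_cast; ring
    have hslice : PySem.List.slice (pre ++ v :: r) none (some ((pre.length : Int) + 1))
        = pre ++ [v] := by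
      rw [hcast, PySem.List.slice_to_natCast]
      have : pre.length + 1 = pre.length + 1 := rfl
      rw [List.take_append]
      simp
    have hhead : PySem.List.min? (PySem.List.slice (pre ++ v :: r) none (some ((pre.length : Int) + 1))) (fun y => y) = some (min m v) := by
      rw [hslice]; exact min?_push pre m v hmin
    rw [hhead]
    have hpre' : PySem.List.min? (pre ++ [v]) (fun y => y) = some (min m v) :=
      min?_push pre m v hmin
    have hlist : pre ++ v :: r = (pre ++ [v]) ++ r := by simp
    have hlen : (pre.length : Int) + 1 = (((pre ++ [v]).length : Nat) : Int) := by simp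
    rw [hlist, hlen, ih (pre ++ [v]) (min m v) hpre']
    simp [coreV]

-- ===== VERDICT (by name: the statement is the Claim_ definition above) =====
theorem find_profits_spec : Claim_equal_find_profits := by
  intro prices _ hpre
  unfold Spec_find_profits
  match prices, hpre with
  | p0 :: rest, _ =>
    unfold find_profits find_profits_alt
    have hget : PySem.List.pyGet? (p0 :: rest) 0 = some p0 := by
      simp [PySem.List.pyGet?, PySem.List.pyIdx?]
    rw [hget]
    simp only []
    -- A side: fold over pyRange = fold over enumerate, then foldA_core
    have h1 := foldl_pyRange_enumerate (d := 0)
      (g := fun (st : List Int × Int) i x =>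
        let v := x + i
        let mp := if v < st.2 then v else st.2
        (st.1 ++ [v - mp], mp)) (p0 :: rest) [] ([], p0)
    simp only [List.length_nil, Nat.cast_zero, List.nil_append, zero_add] at h1
    rw [h1]
    rw [PySem.List.enumerate_cons]
    simp only [List.foldl_cons, add_zero, lt_self_iff_false, if_false, sub_self, List.nil_append]
    rw [foldA_core (PySem.List.enumerate rest (0 + 1)) [0] p0]
    -- B side
    simp only [List.map_cons, add_zero]
    set vs := (PySem.List.enumerate rest (0 + 1)).map (fun ip => ip.2 + ip.1) with hvs
    rw [PySem.List.enumerate_cons, List.map_cons]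
    have hhead : PySem.List.slice (p0 :: vs) none (some ((0 : Int) + 1)) = [p0] := by
      rw [(by norm_num : ((0 : Int) + 1) = ((1 : Nat) : Int)), PySem.List.slice_to_natCast]
      simp
    rw [hhead]
    have hm0 : PySem.List.min? [p0] (fun y => y) = some p0 := by
      rw [PySem.List.min?_id_cons]; simp
    rw [hm0]
    have htail := B_core vs [p0] p0 hm0
    norm_num at htail ⊢
    rw [htail]
  | [], h => exact absurd rfl h
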